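-- pv_equiv track=rewrite | github.com/AufarZakiev/FOINC | examples/bioinformatics/analyze_sequence.py | longest_orf_length
-- ===== SOURCE A (Python) =====
-- _COMP = {"A": "T", "T": "A", "G": "C", "C": "G", "N": "N"}
--
-- _STOPS = {"TAA", "TAG", "TGA"}
--
-- _START = "ATG"
--
-- def reverse_complement(seq: str) -> str:
--     return "".join(_COMP.get(b, "N") for b in reversed(seq))
--
-- def longest_orf_length(seq: str) -> int:
--     """Longest open reading frame length across all 6 frames, in nucleotides."""
--     best = 0
--     for strand in (seq, reverse_complement(seq)):
--         for frame in range(3):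
--             current_start = None
--             i = frame
--             while i + 3 <= len(strand):
--                 codon = strand[i : i + 3]
--                 if current_start is None:
--                     if codon == _START:
--                         current_start = i
--                 else:
--                     if codon in _STOPS:
--                         best = max(best, i - current_start)
--                         current_start = None
--                 i += 3
--             if current_start is not None:
--                 best = max(best, i - current_start)
--     return best
-- ===== SOURCE B (Python) =====
-- _COMP = {"A": "T", "T": "A", "G": "C", "C": "G", "N": "N"}
--
-- _STOPS = {"TAA", "TAG", "TGA"}
--
-- _START = "ATG"
--
--
-- def _rc(seq: str) -> str:
--     return "".join(_COMP.get(b, "N") for b in reversed(seq))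
--
--
-- def longest_orf_length(seq: str) -> int:
--     """Longest ORF length across all 6 frames: per frame, collect the ATG and
--     stop codon positions once, then pair them with a greedy two-pointer pass."""
--     best = 0
--     for strand in (seq, _rc(seq)):
--         n = len(strand)
--         for frame in range(3):
--             positions = list(range(frame, n - 2, 3))
--             iend = frame + 3 * len(positions)
--             starts = [i for i in positions if strand[i:i + 3] == _START]
--             stops = [i for i in positions if strand[i:i + 3] in _STOPS]
--             while starts:
--                 s = starts[0]
--                 stops = [t for t in stops if t > s]
--                 if stops:
--                     t = stops[0]
--                     best = max(best, t - s)
--                     starts = [u for u in starts if u > t]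
--                 else:
--                     best = max(best, iend - s)
--                     break
--     return best
-- ===== Notes on version B (the rewrite author's own statement) =====
-- stated objective: alternative
-- what changed: A scans every codon with a current_start/None state machine; B instead collects, per strand and frame, the lists of ATG and stop codon positions once and pairs them with a greedy two-pointer pass (nearest stop after each start, skipping starts inside an ORF, trailing ORF measured to the last full-codon boundary).
import Mathlib
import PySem

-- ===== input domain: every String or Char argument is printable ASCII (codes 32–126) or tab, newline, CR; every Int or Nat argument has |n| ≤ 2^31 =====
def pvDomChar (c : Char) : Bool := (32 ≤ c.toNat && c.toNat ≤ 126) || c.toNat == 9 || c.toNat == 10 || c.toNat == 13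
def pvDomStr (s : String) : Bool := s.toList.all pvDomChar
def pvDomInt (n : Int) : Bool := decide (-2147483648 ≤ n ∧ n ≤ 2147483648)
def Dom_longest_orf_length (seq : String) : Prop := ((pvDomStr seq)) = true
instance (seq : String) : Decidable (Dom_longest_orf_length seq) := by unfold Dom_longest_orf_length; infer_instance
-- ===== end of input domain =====

-- B replaces A's per-codon state-machine scan by: collect ATG/stop codon positions per frame,
-- then a greedy two-pointer pairing pass (objective: alternative decomposition, same cost).

-- ===== PORT A =====
-- module constants shared by both Pythons (same module-level _COMP/_STOPS/_START)
def pvComp : PySem.Dict String String :=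
  PySem.Dict.ofList [("A", "T"), ("T", "A"), ("G", "C"), ("C", "G"), ("N", "N")]
def pvStops : PySem.Set String := PySem.Set.ofList ["TAA", "TAG", "TGA"]
def pvStart : String := "ATG"

def reverse_complement (seq : String) : String :=
  PySem.Str.join "" ((seq.toList.reverse).map (fun b => pvComp.getD (String.ofList [b]) "N"))

-- the 'while i + 3 <= len(strand)' loop of A, with the trailing-ORF check at exit
def pvGoA (strand : String) (i : Int) (cur : Option Int) (best : Int) : Int :=
  if _h : i + 3 ≤ PySem.Str.len strand then
    let codon := PySem.Str.slice strand (some i) (some (i + 3))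
    match cur with
    | none => pvGoA strand (i + 3) (if codon = pvStart then some i else none) best
    | some s =>
      if pvStops.contains codon then pvGoA strand (i + 3) none (max best (i - s))
      else pvGoA strand (i + 3) (some s) best
  else
    match cur with
    | some s => max best (i - s)
    | none => best
termination_by (PySem.Str.len strand - i).toNat
decreasing_by all_goals omega

def longest_orf_length (seq : String) : Int :=
  [seq, reverse_complement seq].foldl
    (fun best strand =>
      (PySem.List.pyRange 0 3 1).foldl (fun best frame => pvGoA strand frame none best) best) 0

-- ===== PORT B =====
-- codon tests of Source B's comprehension filters, named as helpers
def pvIsS (strand : String) (i : Int) : Bool :=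
  decide (PySem.Str.slice strand (some i) (some (i + 3)) = pvStart)
def pvIsT (strand : String) (i : Int) : Bool :=
  pvStops.contains (PySem.Str.slice strand (some i) (some (i + 3)))

def pvRcAlt (seq : String) : String :=
  PySem.Str.join "" ((seq.toList.reverse).map (fun b => pvComp.getD (String.ofList [b]) "N"))

-- the 'while starts:' greedy two-pointer pairing loop of Source B
def pvTwoPtr (iend : Int) (starts stops : List Int) (best : Int) : Int :=
  match starts with
  | [] => best
  | s :: ss =>
    match h : stops.filter (fun t => decide (s < t)) with
    | [] => max best (iend - s)
    | t :: ts =>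
      pvTwoPtr iend ((s :: ss).filter (fun u => decide (t < u))) (t :: ts) (max best (t - s))
termination_by starts.length
decreasing_by
  have hst : s < t := by
    have ht : t ∈ stops.filter (fun t => decide (s < t)) := by rw [h]; exact List.mem_cons_self
    simpa using (List.mem_filter.mp ht).2
  simp only [List.filter_cons, decide_eq_true_eq]
  rw [if_neg (by omega)]
  have := List.length_filter_le (fun u => decide (t < u)) ss
  simp only [List.length_cons]
  omega

def longest_orf_length_alt (seq : String) : Int :=
  [seq, pvRcAlt seq].foldl
    (fun best strand =>
      let n := PySem.Str.len strand
      (PySem.List.pyRange 0 3 1).foldl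
        (fun best frame =>
          let positions := PySem.List.pyRange frame (n - 2) 3
          let iend := frame + 3 * (positions.length : Int)
          let starts := positions.filter (pvIsS strand)
          let stops := positions.filter (pvIsT strand)
          pvTwoPtr iend starts stops best)
        best)
    0

-- ===== PRECONDITION & SPEC =====
def Spec_longest_orf_length (seq : String) (out : Int) : Prop := out = longest_orf_length_alt seq
instance (seq : String) (out : Int) : Decidable (Spec_longest_orf_length seq out) := by unfold Spec_longest_orf_length; infer_instance

-- ===== CLAIM (what is proved, stated in full; the proofs are below) =====
def Claim_equal_longest_orf_length : Prop := ∀ (seq : String), Dom_longest_orf_length seq → Spec_longest_orf_length seq (longest_orf_length seq)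

-- ===== LEMMAS AND PROOFS =====

-- step-3 range induction forms
lemma pvRange3_nil (a b : Int) (h : b ≤ a) : PySem.List.pyRange a b 3 = [] := by
  rw [PySem.List.pyRange_of_pos a b (by norm_num)]
  rw [if_neg (by omega)]
  simp

lemma pvRange3_cons (a b : Int) (h : a < b) :
    PySem.List.pyRange a b 3 = a :: PySem.List.pyRange (a + 3) b 3 := by
  rw [PySem.List.pyRange_of_pos a b (by norm_num), PySem.List.pyRange_of_pos (a+3) b (by norm_num)]
  rw [if_pos h]
  have hpos : 0 < ((b - a + 3 - 1) / 3).toNat := by omega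
  obtain ⟨m, hm⟩ : ∃ m, ((b - a + 3 - 1) / 3).toNat = m + 1 := ⟨_, (Nat.succ_pred_eq_of_pos hpos).symm⟩
  rw [hm, List.range_succ_eq_map]
  simp only [List.map_cons, List.map_map]
  have hm2 : m = if a + 3 < b then ((b - (a + 3) + 3 - 1) / 3).toNat else 0 := by
    split <;> omega
  rw [List.cons_eq_cons]
  refine ⟨by simp, ?_⟩
  rw [← hm2]
  refine List.map_congr_left ?_
  intro k _
  simp only [Function.comp_apply, Nat.succ_eq_add_one]
  push_cast
  ring

-- abstract per-frame scan of A (codon tests abstracted to predicates on the position)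
def pvScan (isS isT : Int → Bool) (iend : Int) : List Int → Option Int → Int → Int
  | [], some s, best => max best (iend - s)
  | [], none, best => best
  | p :: rest, none, best => pvScan isS isT iend rest (if isS p then some p else none) best
  | p :: rest, some s, best =>
    if isT p then pvScan isS isT iend rest none (max best (p - s))
    else pvScan isS isT iend rest (some s) best

lemma pvTwoPtr_nil (iend : Int) (stops : List Int) (best : Int) :
    pvTwoPtr iend [] stops best = best := by
  rw [pvTwoPtr.eq_def]

lemma pvTwoPtr_cons_nil (iend s : Int) (ss stops : List Int) (best : Int)
    (hf : stops.filter (fun t => decide (s < t)) = []) :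
    pvTwoPtr iend (s :: ss) stops best = max best (iend - s) := by
  rw [pvTwoPtr.eq_def]
  split
  · simp_all
  · next s' ss' heq =>
    obtain ⟨rfl, rfl⟩ := heq
    split <;> simp_all

lemma pvTwoPtr_cons_cons (iend s t : Int) (ss stops ts : List Int) (best : Int)
    (hf : stops.filter (fun t => decide (s < t)) = t :: ts) :
    pvTwoPtr iend (s :: ss) stops best =
      pvTwoPtr iend ((s :: ss).filter (fun u => decide (t < u))) (t :: ts) (max best (t - s)) := by
  rw [pvTwoPtr.eq_def]
  split
  · simp_all
  · next s' ss' heq =>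
    obtain ⟨rfl, rfl⟩ := heq
    split <;> simp_all

-- an extra stop in front that precedes every start is ignored by the pairing loop
lemma pvTwoPtr_drop_stop (iend t0 : Int) (starts stops : List Int) (best : Int)
    (h : ∀ s ∈ starts, t0 < s) :
    pvTwoPtr iend starts (t0 :: stops) best = pvTwoPtr iend starts stops best := by
  cases starts with
  | nil => rw [pvTwoPtr_nil, pvTwoPtr_nil]
  | cons s ss =>
    have hf : (t0 :: stops).filter (fun t => decide (s < t))
        = stops.filter (fun t => decide (s < t)) := by
      have := h s List.mem_cons_self
      simp only [List.filter_cons, decide_eq_true_eq]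
      rw [if_neg (by omega)]
    cases hft : stops.filter (fun t => decide (s < t)) with
    | nil =>
      rw [pvTwoPtr_cons_nil _ _ _ _ _ (hf.trans hft), pvTwoPtr_cons_nil _ _ _ _ _ hft]
    | cons t ts =>
      rw [pvTwoPtr_cons_cons _ _ _ _ _ _ _ (hf.trans hft), pvTwoPtr_cons_cons _ _ _ _ _ _ _ hft]

-- THE CORE LEMMA: A's codon state machine equals B's greedy two-pointer pairing
lemma pvScan_eq_twoPtr (isS isT : Int → Bool) (hdisj : ∀ i, isS i = true → isT i = false)
    (iend : Int) (ps : List Int) (hpw : ps.Pairwise (· < ·)) :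
    (∀ best, pvScan isS isT iend ps none best
        = pvTwoPtr iend (ps.filter isS) (ps.filter isT) best)
    ∧ (∀ s best, (∀ p ∈ ps, s < p) →
        pvScan isS isT iend ps (some s) best
          = pvTwoPtr iend (s :: ps.filter isS) (ps.filter isT) best) := by
  induction ps with
  | nil =>
    constructor
    · intro best
      rw [pvScan]
      simp only [List.filter_nil]
      rw [pvTwoPtr_nil]
    · intro s best _
      rw [pvScan]
      simp only [List.filter_nil]
      rw [pvTwoPtr_cons_nil _ _ _ _ _ (by simp)]
  | cons p rest ih =>
    rw [List.pairwise_cons] at hpw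
    obtain ⟨hp, hrest⟩ := hpw
    obtain ⟨ih1, ih2⟩ := ih hrest
    have hfiltS : ∀ q ∈ rest.filter isS, p < q := fun q hq => hp q (List.mem_of_mem_filter hq)
    have hfiltT : ∀ q ∈ rest.filter isT, p < q := fun q hq => hp q (List.mem_of_mem_filter hq)
    constructor
    · intro best
      rw [pvScan]
      by_cases hS : isS p = true
      · have hT : isT p = false := hdisj p hS
        rw [hS, if_pos rfl, List.filter_cons, List.filter_cons, if_pos hS, if_neg (by simp [hT])]
        exact ih2 p best hp
      · rw [if_neg hS]
        by_cases hT : isT p = true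
        · rw [List.filter_cons, List.filter_cons, if_neg (by simp [hS]), if_pos hT]
          rw [pvTwoPtr_drop_stop _ _ _ _ _ hfiltS]
          exact ih1 best
        · rw [List.filter_cons, List.filter_cons, if_neg (by simp [hS]),
            if_neg (by simp_all)]
          exact ih1 best
    · intro s best hs
      have hsp : s < p := hs p List.mem_cons_self
      have hsrest : ∀ q ∈ rest, s < q := fun q hq => hs q (List.mem_cons_of_mem _ hq)
      rw [pvScan]
      by_cases hT : isT p = true
      · have hS : isS p = false := by
          by_contra hc
          have := hdisj p (by simpa using hc)
          simp_all
        rw [hT, if_pos rfl]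
        rw [List.filter_cons, List.filter_cons, if_neg (by simp [hS]), if_pos hT]
        have hstops : (p :: rest.filter isT).filter (fun t => decide (s < t))
            = p :: rest.filter isT := by
          refine List.filter_eq_self.mpr ?_
          intro a ha
          rcases List.mem_cons.mp ha with rfl | ha'
          · simpa using hsp
          · have := hsrest a (List.mem_of_mem_filter ha')
            simpa using this
        rw [pvTwoPtr_cons_cons _ _ _ _ _ _ _ hstops]
        have hstarts : (s :: rest.filter isS).filter (fun u => decide (p < u))
            = rest.filter isS := by
          rw [List.filter_cons]
          rw [if_neg (by simp; omega)]
          exact List.filter_eq_self.mpr (fun a ha => by simpa using hfiltS a ha)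
        rw [hstarts, pvTwoPtr_drop_stop _ _ _ _ _ hfiltS]
        exact ih1 (max best (p - s))
      · rw [if_neg hT]
        by_cases hS : isS p = true
        · rw [List.filter_cons, List.filter_cons, if_pos hS, if_neg (by simp_all)]
          rw [ih2 s best hsrest]
          -- both sides: the extra start p inside the running ORF is skipped
          have hstops : (rest.filter isT).filter (fun t => decide (s < t)) = rest.filter isT :=
            List.filter_eq_self.mpr
              (fun a ha => by simpa using hsrest a (List.mem_of_mem_filter ha))
          cases hft : rest.filter isT with
          | nil =>
            rw [pvTwoPtr_cons_nil _ _ _ _ _ (by simp), pvTwoPtr_cons_nil _ _ _ _ _ (by simp)]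
          | cons t ts =>
            have hstops' : (t :: ts).filter (fun x => decide (s < x)) = t :: ts := by
              rw [← hft]; exact hstops
            have hst : s < t := by
              have : t ∈ rest.filter isT := by rw [hft]; exact List.mem_cons_self
              exact hsrest t (List.mem_of_mem_filter this)
            have hpt : p < t := by
              have : t ∈ rest.filter isT := by rw [hft]; exact List.mem_cons_self
              exact hp t (List.mem_of_mem_filter this)
            rw [pvTwoPtr_cons_cons _ _ _ _ _ _ _ hstops', pvTwoPtr_cons_cons _ _ _ _ _ _ _ hstops']
            congr 1
            simp only [List.filter_cons, decide_eq_true_eq]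
            rw [if_neg (by omega : ¬ t < p), if_neg (by omega : ¬ t < s)]
        · rw [List.filter_cons, List.filter_cons, if_neg (by simp_all), if_neg (by simp_all)]
          exact ih2 s best hsrest

lemma pvPairwise3 (a b : Int) : (PySem.List.pyRange a b 3).Pairwise (· < ·) := by
  rw [PySem.List.pyRange_of_pos a b (by norm_num)]
  refine List.pairwise_map.mpr ?_
  refine List.Pairwise.imp ?_ List.pairwise_lt_range
  intro x y hxy
  omega

lemma pvDisj (strand : String) : ∀ i, pvIsS strand i = true → pvIsT strand i = false := by
  intro i h
  rw [pvIsS, decide_eq_true_eq] at h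
  rw [pvIsT, h]
  decide

-- A's while loop, read off against the abstract scan over the frame's codon positions
lemma pvGoA_eq_scan (strand : String) (i : Int) (cur : Option Int) (best : Int) :
    pvGoA strand i cur best =
      pvScan (pvIsS strand) (pvIsT strand)
        (i + 3 * ((PySem.List.pyRange i (PySem.Str.len strand - 2) 3).length : Int))
        (PySem.List.pyRange i (PySem.Str.len strand - 2) 3) cur best := by
  suffices H : ∀ (k : Nat) (i : Int) (cur : Option Int) (best : Int),
      (PySem.Str.len strand - i).toNat ≤ k →
      pvGoA strand i cur best =
        pvScan (pvIsS strand) (pvIsT strand)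
          (i + 3 * ((PySem.List.pyRange i (PySem.Str.len strand - 2) 3).length : Int))
          (PySem.List.pyRange i (PySem.Str.len strand - 2) 3) cur best from
    H _ i cur best le_rfl
  intro k
  induction k with
  | zero =>
    intro i cur best hk
    have hno : ¬ (i + 3 ≤ PySem.Str.len strand) := by omega
    rw [pvGoA.eq_def, dif_neg hno, pvRange3_nil _ _ (by omega)]
    cases cur <;> simp [pvScan]
  | succ k ihk =>
    intro i cur best hk
    rw [pvGoA.eq_def]
    by_cases h : i + 3 ≤ PySem.Str.len strand
    · rw [dif_pos h, pvRange3_cons i _ (by omega)]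
      have hlen : (i + 3 * (((i :: PySem.List.pyRange (i + 3) (PySem.Str.len strand - 2) 3)).length : Int))
          = (i + 3) + 3 * ((PySem.List.pyRange (i + 3) (PySem.Str.len strand - 2) 3).length : Int) := by
        simp only [List.length_cons]
        push_cast
        ring
      rw [hlen]
      cases cur with
      | none =>
        dsimp only
        rw [pvScan]
        rw [ihk (i + 3) _ best (by omega)]
        by_cases hS : PySem.Str.slice strand (some i) (some (i + 3)) = pvStart
        · rw [if_pos hS, if_pos (by rw [pvIsS, decide_eq_true_eq]; exact hS)]
        · rw [if_neg hS, if_neg (by rw [pvIsS, decide_eq_true_eq]; exact hS)]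
      | some s =>
        dsimp only
        rw [pvScan]
        by_cases hT : pvStops.contains (PySem.Str.slice strand (some i) (some (i + 3))) = true
        · rw [if_pos hT, if_pos (by rw [pvIsT]; exact hT), ihk (i + 3) _ _ (by omega)]
        · rw [if_neg hT, if_neg (by rw [pvIsT]; exact hT), ihk (i + 3) _ _ (by omega)]
    · rw [dif_neg h, pvRange3_nil _ _ (by omega)]
      cases cur <;> dsimp only <;> simp [pvScan]

-- one strand, one frame: A's scan equals B's collect-then-pair pass
lemma pvFrame_eq (strand : String) (frame best : Int) :
    pvGoA strand frame none best =
      pvTwoPtr (frame + 3 * ((PySem.List.pyRange frame (PySem.Str.len strand - 2) 3).length : Int))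
        ((PySem.List.pyRange frame (PySem.Str.len strand - 2) 3).filter (pvIsS strand))
        ((PySem.List.pyRange frame (PySem.Str.len strand - 2) 3).filter (pvIsT strand)) best := by
  rw [pvGoA_eq_scan]
  exact (pvScan_eq_twoPtr (pvIsS strand) (pvIsT strand) (pvDisj strand) _ _ (pvPairwise3 _ _)).1 best

lemma pvRc_eq (seq : String) : pvRcAlt seq = reverse_complement seq := rfl

-- ===== VERDICT (by name: the statement is the Claim_ definition above) =====
theorem longest_orf_length_spec : Claim_equal_longest_orf_length := by
  intro seq _
  rw [Spec_longest_orf_length, longest_orf_length, longest_orf_length_alt, pvRc_eq]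
  have h3 : PySem.List.pyRange 0 3 1 = [0, 1, 2] := by decide
  rw [h3]
  simp only [List.foldl]
  rw [pvFrame_eq, pvFrame_eq, pvFrame_eq, pvFrame_eq, pvFrame_eq, pvFrame_eq]
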